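-- pv_equiv track=rewrite | github.com/pedromsilvapt/miei-dissertation | code/musikla/musikla/parser/abstract_syntax_tree/macros/keyboard.py | handle_modifiers
-- ===== SOURCE A (Python) =====
-- from typing import Any, Dict, List, Optional, Tuple, cast
--
-- ModifierNames = [ 'hold', 'extend', 'toggle', 'repeat' ]
--
-- def handle_modifiers ( modifiers : List[str] ) -> Tuple[Dict[str, bool], Optional[str]]:
--     props = dict()
--
--     rest = None
--
--     for i in range( len( modifiers ) - 1, -1, -1 ):
--         if modifiers[ i ] in ModifierNames:
--             props[ modifiers[ i ] ] = True
--         else: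
--             rest = '+'.join( modifiers[ 0:i + 1 ] )
--             break
--
--     return (props, rest)
-- ===== SOURCE B (Python) =====
-- ModifierNames = [ 'hold', 'extend', 'toggle', 'repeat' ]
--
-- def handle_modifiers(modifiers):
--     # forward scan: index of the last element that is NOT a modifier name
--     last_non = -1
--     for i, m in enumerate(modifiers):
--         if m not in ModifierNames:
--             last_non = i
--     # trailing modifiers, inserted in reverse index order (matches dict order)
--     props = {}
--     for k in range(len(modifiers) - 1, last_non, -1):
--         props[modifiers[k]] = True
--     rest = '+'.join(modifiers[:last_non + 1]) if last_non >= 0 else None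
--     return (props, rest)
-- ===== Notes on version B (the rewrite author's own statement) =====
-- stated objective: alternative
-- what changed: Replaces A's backward break-on-first-non-modifier loop with a forward scan computing the last non-modifier index, then builds props over the trailing index range and joins the prefix slice directly.
import Mathlib
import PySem

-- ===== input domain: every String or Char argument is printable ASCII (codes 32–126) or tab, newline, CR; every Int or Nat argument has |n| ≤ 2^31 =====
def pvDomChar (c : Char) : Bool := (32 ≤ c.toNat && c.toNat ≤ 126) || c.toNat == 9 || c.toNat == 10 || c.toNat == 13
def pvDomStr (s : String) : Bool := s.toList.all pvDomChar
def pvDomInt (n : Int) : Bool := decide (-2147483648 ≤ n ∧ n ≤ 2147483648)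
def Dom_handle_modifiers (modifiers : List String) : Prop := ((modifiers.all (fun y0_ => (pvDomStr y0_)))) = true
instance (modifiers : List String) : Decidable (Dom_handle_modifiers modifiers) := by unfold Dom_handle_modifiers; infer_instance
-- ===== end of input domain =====

-- B replaces A's backward break-on-first-non-modifier loop with a forward scan for the
-- last non-modifier index, then fills props over the trailing range; alternative decomposition.

def ModifierNames : List String := ["hold", "extend", "toggle", "repeat"]

-- ===== PORT A =====
-- A's loop: for i in range(len-1, -1, -1); fuel n+1 means current index is n; break returns.
def handle_modifiers_loop (ms : List String) :
    Nat → PySem.Dict String Bool → (List (String × Bool)) × Option String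
  | 0, props => (props.items, none)
  | n + 1, props =>
    let m := ms.getD n ""          -- modifiers[i], always in range in this loop
    if m ∈ ModifierNames then
      handle_modifiers_loop ms n (props.insert m true)
    else
      (props.items, some (PySem.Str.join "+" (PySem.List.slice ms (some 0) (some ((n : Int) + 1)))))

def handle_modifiers (modifiers : List String) : (List (String × Bool)) × Option String :=
  handle_modifiers_loop modifiers modifiers.length PySem.Dict.empty

-- ===== PORT B =====
-- forward scan: index of the last element not in ModifierNames, -1 if none
def bLastNon (ms : List String) : Int :=
  ms.zipIdx.foldl (fun acc p => if p.1 ∈ ModifierNames then acc else (p.2 : Int)) (-1)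

-- for k in range(len-1, last_non, -1): props[ms[k]] = True; fuel n+1 means index n, stop s = last_non+1
def bProps (ms : List String) (s : Nat) :
    Nat → PySem.Dict String Bool → PySem.Dict String Bool
  | 0, d => d
  | n + 1, d => if n < s then d else bProps ms s n (d.insert (ms.getD n "") true)

def handle_modifiers_alt (modifiers : List String) : (List (String × Bool)) × Option String :=
  let t := bLastNon modifiers
  let props := bProps modifiers (t + 1).toNat modifiers.length PySem.Dict.empty
  let rest : Option String :=
    if t ≥ 0 then some (PySem.Str.join "+" (PySem.List.slice modifiers none (some (t + 1))))
    else none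
  (props.items, rest)

-- ===== PRECONDITION & SPEC =====
def Spec_handle_modifiers (modifiers : List String) (out : (List (String × Bool)) × Option String) : Prop := out = handle_modifiers_alt modifiers
instance (modifiers : List String) (out : (List (String × Bool)) × Option String) : Decidable (Spec_handle_modifiers modifiers out) := by unfold Spec_handle_modifiers; infer_instance

-- ===== CLAIM (what is proved, stated in full; the proofs are below) =====
def Claim_equal_handle_modifiers : Prop := ∀ (modifiers : List String), Dom_handle_modifiers modifiers → Spec_handle_modifiers modifiers (handle_modifiers modifiers)

-- ===== LEMMAS AND PROOFS =====

-- the last-non-modifier index among the first n elements, as a downward recursion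
def gIdx (ms : List String) : Nat → Int
  | 0 => -1
  | n + 1 => if ms.getD n "" ∈ ModifierNames then gIdx ms n else (n : Int)

theorem gIdx_lt (ms : List String) (n : Nat) : gIdx ms n < (n : Int) := by
  induction n with
  | zero => simp [gIdx]
  | succ k ih =>
    simp only [gIdx]
    split
    · exact lt_trans ih (by exact_mod_cast Nat.lt_succ_self k)
    · exact_mod_cast Nat.lt_succ_self k

theorem gIdx_append (ms : List String) (x : String) (k : Nat) (hk : k ≤ ms.length) :
    gIdx (ms ++ [x]) k = gIdx ms k := by
  induction k with
  | zero => rfl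
  | succ j ih =>
    have hj : j ≤ ms.length := Nat.le_of_succ_le hk
    have hlt : j < ms.length := Nat.lt_of_succ_le hk
    simp only [gIdx, ih hj]
    have : (ms ++ [x]).getD j "" = ms.getD j "" := by
      simp [List.getD, List.getElem?_append_left hlt]
    rw [this]

theorem bLastNon_eq_gIdx (ms : List String) : bLastNon ms = gIdx ms ms.length := by
  induction ms using List.reverseRecOn with
  | nil => rfl
  | append_singleton ms x ih =>
    have hz : (ms ++ [x]).zipIdx = ms.zipIdx ++ [(x, ms.length)] := by
      simp [List.zipIdx_append]
    unfold bLastNon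
    rw [hz, List.foldl_append]
    simp only [List.foldl_cons, List.foldl_nil]
    have hlen : (ms ++ [x]).length = ms.length + 1 := by simp
    rw [hlen]
    simp only [gIdx, gIdx_append ms x ms.length (le_refl _)]
    have hget : (ms ++ [x]).getD ms.length "" = x := by
      simp [List.getD]
    rw [hget]
    split <;> simp_all [bLastNon]

theorem loop_eq (ms : List String) (n : Nat) (d : PySem.Dict String Bool) :
    handle_modifiers_loop ms n d =
      ((bProps ms (gIdx ms n + 1).toNat n d).items,
        if gIdx ms n ≥ 0 then
          some (PySem.Str.join "+" (PySem.List.slice ms (some 0) (some (gIdx ms n + 1))))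
        else none) := by
  induction n generalizing d with
  | zero => simp [handle_modifiers_loop, bProps, gIdx]
  | succ k ih =>
    simp only [handle_modifiers_loop, gIdx]
    by_cases hm : ms.getD k "" ∈ ModifierNames
    · simp only [if_pos hm]
      rw [ih]
      have hg : gIdx ms k < (k : Int) := gIdx_lt ms k
      have hs : (gIdx ms k + 1).toNat ≤ k := by omega
      have : bProps ms (gIdx ms k + 1).toNat (k + 1) d
          = bProps ms (gIdx ms k + 1).toNat k (d.insert (ms.getD k "") true) := by
        simp only [bProps, if_neg (by omega : ¬ k < (gIdx ms k + 1).toNat)]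
      rw [this]
    · simp only [if_neg hm]
      have hs : ((k : Int) + 1).toNat = k + 1 := by omega
      have hb : bProps ms (k + 1) (k + 1) d = d := by
        simp [bProps]
      rw [hs, hb]
      simp

theorem handle_modifiers_spec_aux (ms : List String) :
    handle_modifiers ms = handle_modifiers_alt ms := by
  unfold handle_modifiers handle_modifiers_alt
  rw [loop_eq, bLastNon_eq_gIdx]
  simp [PySem.List.slice_zero_start]

-- ===== VERDICT (by name: the statement is the Claim_ definition above) =====
theorem handle_modifiers_spec : Claim_equal_handle_modifiers := by
  intro ms _
  unfold Spec_handle_modifiers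
  exact handle_modifiers_spec_aux ms
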